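-- pv_equiv track=rewrite | github.com/kelpasa/Code_Wars_Python | 6 кю/World Bits War.py | num_odd
-- ===== SOURCE A (Python) =====
-- def num_odd(numbers):
--     odd = ([(bin(i).replace('0b', '').replace('0', '')) for i in numbers if i % 2 == 1])
--     num_minus_odd = ''
--     num_plus_odd = ''
--     for i in odd:
--         try:
--             if i[0] == '-':
--                 num_minus_odd += i[1:]
--             else:
--                 num_plus_odd += i
--         except:
--             num_plus_odd += i
--
--     return  num_plus_odd.count('1') - num_minus_odd.count('1')
-- ===== SOURCE B (Python) =====
-- def num_odd(numbers):
--     total = 0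
--     for i in numbers:
--         if i % 2 == 1:
--             c = (-i if i < 0 else i).bit_count()
--             total = total + (c if i >= 0 else -c)
--     return total
-- ===== Notes on version B (the rewrite author's own statement) =====
-- stated objective: simpler
-- what changed: B replaces A's two concatenated bit-string buffers and deferred end-of-loop '1'-counting with a single pass keeping one integer accumulator, adding or subtracting each odd element's popcount directly.
import Mathlib
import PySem

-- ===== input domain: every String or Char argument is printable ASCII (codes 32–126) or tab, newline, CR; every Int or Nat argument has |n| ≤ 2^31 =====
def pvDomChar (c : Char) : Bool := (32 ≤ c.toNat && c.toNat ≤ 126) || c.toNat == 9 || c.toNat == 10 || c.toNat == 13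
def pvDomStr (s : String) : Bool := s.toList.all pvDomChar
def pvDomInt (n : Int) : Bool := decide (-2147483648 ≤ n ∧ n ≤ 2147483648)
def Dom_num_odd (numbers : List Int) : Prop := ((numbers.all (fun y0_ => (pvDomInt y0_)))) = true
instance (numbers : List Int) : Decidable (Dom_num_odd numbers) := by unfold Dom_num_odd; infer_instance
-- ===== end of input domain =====

-- B replaces A's two concatenated bit-string buffers and deferred end-of-loop '1'-counting with a
-- single pass keeping one integer accumulator (simpler; same asymptotic cost).

-- ===== PORT A =====
-- hand-port of Python's bin(n) digit string for n : Nat (MSB first; exact: bin builds binary digits of |n|)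
def pvBinDigits : Nat → List Char
  | 0 => []
  | (n+1) => pvBinDigits ((n+1)/2) ++ [if (n+1) % 2 == 1 then '1' else '0']
decreasing_by exact Nat.div_lt_self (Nat.succ_pos n) (by omega)

-- hand-port of Python's bin(i): sign, "0b" prefix, binary digits of |i| (bin(0) = "0b0"); exact
def pvBin (i : Int) : String :=
  (if i < 0 then "-0b" else "0b") ++ String.ofList (if i.natAbs == 0 then ['0'] else pvBinDigits i.natAbs)

def num_odd (numbers : List Int) : Int :=
  let odd := (numbers.filter (fun i => PySem.Int.mod i 2 == 1)).map
      (fun i => PySem.Str.replace (PySem.Str.replace (pvBin i) "0b" "") "0" "")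
  let st := odd.foldl (fun (st : String × String) s =>
      match PySem.Str.pyGet? s 0 with
      | some c => if c == '-' then (st.1 ++ PySem.Str.slice s (some 1) none, st.2)
                  else (st.1, st.2 ++ s)
      | none => (st.1, st.2 ++ s)) ("", "")
  (PySem.Str.count st.2 "1" : Int) - (PySem.Str.count st.1 "1" : Int)

-- ===== PORT B =====
def num_odd_alt (numbers : List Int) : Int :=
  numbers.foldl (fun total i =>
    if PySem.Int.mod i 2 == 1 then
      let c : Int := (PySem.Int.bitCount (if i < 0 then -i else i) : Int)
      total + (if 0 ≤ i then c else -c)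
    else total) 0

-- ===== PRECONDITION & SPEC =====
def Spec_num_odd (numbers : List Int) (out : Int) : Prop := out = num_odd_alt numbers
instance (numbers : List Int) (out : Int) : Decidable (Spec_num_odd numbers out) := by unfold Spec_num_odd; infer_instance

-- ===== CLAIM (what is proved, stated in full; the proofs are below) =====
def Claim_equal_num_odd : Prop := ∀ (numbers : List Int), Dom_num_odd numbers → Spec_num_odd numbers (num_odd numbers)

-- ===== LEMMAS AND PROOFS =====

-- one-step / base equations of the fuel recursions (match reductions exposed as lemmas)
theorem pvReplaceGoNil (old new acc : List Char) (f : Nat) :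
    PySem.Chars.replace.go old new f [] acc = acc.reverse := by
  cases f with
  | zero => show acc.reverse ++ [] = _ ; simp
  | succ f => rfl

theorem pvReplaceGoCons (old new : List Char) (f : Nat) (c : Char) (t acc : List Char) :
    PySem.Chars.replace.go old new (f+1) (c::t) acc =
      if old.isPrefixOf (c::t) then
        PySem.Chars.replace.go old new f (List.drop old.length (c::t)) (new.reverse ++ acc)
      else PySem.Chars.replace.go old new f t (c::acc) := rfl

theorem pvCountGoNil (sub : List Char) (acc f : Nat) :
    PySem.Chars.count.go sub f [] acc = acc := by
  cases f <;> rfl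

theorem pvCountGoCons (sub : List Char) (f : Nat) (c : Char) (t : List Char) (acc : Nat) :
    PySem.Chars.count.go sub (f+1) (c::t) acc =
      if sub.isPrefixOf (c::t) then PySem.Chars.count.go sub f (List.drop sub.length (c::t)) (acc+1)
      else PySem.Chars.count.go sub f t acc := rfl

-- every bin digit is '0' or '1'
theorem pvBinDigits_mem (n : Nat) : ∀ c ∈ pvBinDigits n, c = '0' ∨ c = '1' := by
  induction n using Nat.strong_induction_on with
  | _ n ih =>
    cases n with
    | zero => simp [pvBinDigits]
    | succ m =>
      intro c hc
      rw [pvBinDigits] at hc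
      rcases List.mem_append.mp hc with h | h
      · exact ih ((m+1)/2) (Nat.div_lt_self (Nat.succ_pos m) (by omega)) c h
      · simp at h; split at h <;> simp [h]

-- count of '1' in the bin digits is Python's bit_count
theorem pvBinDigits_count (n : Nat) :
    (pvBinDigits n).count '1' = PySem.Int.bitCount (n : Int) := by
  induction n using Nat.strong_induction_on with
  | _ n ih =>
    cases n with
    | zero => simp [pvBinDigits, PySem.Int.bitCount_zero]
    | succ m =>
      rw [pvBinDigits, PySem.Int.bitCount_natCast (show 0 < m + 1 by omega)]
      rw [List.count_append]
      rw [← ih ((m+1)/2) (Nat.div_lt_self (Nat.succ_pos m) (by omega))]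
      rcases Nat.mod_two_eq_zero_or_one (m+1) with h | h <;>
        simp [h] <;> omega

-- replace.go with pattern "0b" leaves a 'b'-free list unchanged
theorem replace_go_0b_no_occ (l acc : List Char) (fuel : Nat)
    (hf : l.length ≤ fuel) (hb : 'b' ∉ l) :
    PySem.Chars.replace.go ['0','b'] [] fuel l acc = acc.reverse ++ l := by
  induction l generalizing fuel acc with
  | nil => rw [pvReplaceGoNil]; simp
  | cons c t ih =>
    cases fuel with
    | zero => simp at hf
    | succ f =>
      have hpre : ['0','b'].isPrefixOf (c :: t) = false := by
        cases t with
        | nil => simp [List.isPrefixOf]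
        | cons d t' =>
          by_cases hd : d = 'b'
          · subst hd; exact absurd (by simp) hb
          · simp [List.isPrefixOf]
            intro _
            exact fun h => hd h.symm
      rw [pvReplaceGoCons, hpre]
      simp only [Bool.false_eq_true, if_false]
      rw [ih (c :: acc) f (by simpa using hf) (fun h => hb (List.mem_cons_of_mem _ h))]
      simp

-- replace with "0b" on bin(i)'s string strips exactly the "0b"
theorem replace_0b (pre ds : List Char) (hpre : pre = [] ∨ pre = ['-']) (hb : 'b' ∉ ds) :
    PySem.Chars.replace (pre ++ '0' :: 'b' :: ds) ['0','b'] [] = pre ++ ds := by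
  rcases hpre with h | h <;> subst h
  · simp only [List.nil_append]
    rw [PySem.Chars.replace]
    simp only [List.isEmpty_cons, Bool.false_eq_true, if_false]
    show PySem.Chars.replace.go ['0','b'] [] (ds.length + 2) _ [] = _
    rw [pvReplaceGoCons]
    have : ['0','b'].isPrefixOf ('0' :: 'b' :: ds) = true := by simp [List.isPrefixOf]
    rw [this]
    simp only [if_true, List.length_cons, List.length_nil, List.drop_succ_cons, List.drop_zero,
      List.reverse_nil, List.nil_append]
    rw [replace_go_0b_no_occ ds [] (ds.length + 1) (by omega) hb]
    simp
  · rw [PySem.Chars.replace]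
    simp only [List.isEmpty_cons, Bool.false_eq_true, if_false, List.cons_append, List.nil_append]
    show PySem.Chars.replace.go ['0','b'] [] (ds.length + 3) _ [] = _
    rw [pvReplaceGoCons]
    have h1 : ['0','b'].isPrefixOf ('-' :: '0' :: 'b' :: ds) = false := by
      simp [List.isPrefixOf]
    rw [h1]
    simp only [Bool.false_eq_true, if_false]
    rw [pvReplaceGoCons]
    have h2 : ['0','b'].isPrefixOf ('0' :: 'b' :: ds) = true := by simp [List.isPrefixOf]
    rw [h2]
    simp only [if_true, List.length_cons, List.length_nil, List.drop_succ_cons, List.drop_zero,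
      List.reverse_nil, List.nil_append]
    rw [replace_go_0b_no_occ ds ['-'] (ds.length + 1) (by omega) hb]
    simp

-- replace.go with single-char pattern "0" filters out the '0's
theorem replace_go_filter0 (l acc : List Char) (fuel : Nat) (hf : l.length ≤ fuel) :
    PySem.Chars.replace.go ['0'] [] fuel l acc = acc.reverse ++ l.filter (· ≠ '0') := by
  induction l generalizing fuel acc with
  | nil => rw [pvReplaceGoNil]; simp
  | cons c t ih =>
    cases fuel with
    | zero => simp at hf
    | succ f =>
      rw [pvReplaceGoCons]
      by_cases hc : c = '0'
      · subst hc
        have : ['0'].isPrefixOf ('0' :: t) = true := by simp [List.isPrefixOf]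
        rw [this]
        simp only [if_true, List.length_cons, List.length_nil, List.drop_succ_cons, List.drop_zero,
          List.reverse_nil, List.nil_append]
        rw [ih acc f (by simpa using hf)]
        simp
      · have : ['0'].isPrefixOf (c :: t) = false := by
          simp [List.isPrefixOf]
          exact fun h => hc h.symm
        rw [this]
        simp only [Bool.false_eq_true, if_false]
        rw [ih (c :: acc) f (by simpa using hf)]
        simp [hc]

theorem replace_filter0 (l : List Char) :
    PySem.Chars.replace l ['0'] [] = l.filter (· ≠ '0') := by
  rw [PySem.Chars.replace]
  simp only [List.isEmpty_cons, Bool.false_eq_true, if_false]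
  rw [replace_go_filter0 l [] l.length le_rfl]
  simp

-- count.go with single-char pattern "1" is List.count
theorem count_go_one (l : List Char) (acc fuel : Nat) (hf : l.length ≤ fuel) :
    PySem.Chars.count.go ['1'] fuel l acc = acc + l.count '1' := by
  induction l generalizing fuel acc with
  | nil => rw [pvCountGoNil]; simp
  | cons c t ih =>
    cases fuel with
    | zero => simp at hf
    | succ f =>
      rw [pvCountGoCons]
      by_cases hc : c = '1'
      · subst hc
        have : ['1'].isPrefixOf ('1' :: t) = true := by simp [List.isPrefixOf]
        rw [this]
        simp only [if_true, List.length_cons, List.length_nil, List.drop_succ_cons, List.drop_zero]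
        rw [ih (acc + 1) f (by simpa using hf)]
        simp
        omega
      · have : ['1'].isPrefixOf (c :: t) = false := by
          simp [List.isPrefixOf]
          exact fun h => hc h.symm
        rw [this]
        simp only [Bool.false_eq_true, if_false]
        rw [ih acc f (by simpa using hf)]
        simp [hc]

theorem count_one (l : List Char) : PySem.Chars.count l ['1'] = l.count '1' := by
  rw [PySem.Chars.count]
  simp only [List.isEmpty_cons, Bool.false_eq_true, if_false]
  rw [count_go_one l 0 l.length le_rfl]
  omega

-- the processed string of an odd i
theorem processed_toList (i : Int) (h : PySem.Int.mod i 2 = 1) :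
    (PySem.Str.replace (PySem.Str.replace (pvBin i) "0b" "") "0" "").toList =
      (if i < 0 then ['-'] else []) ++ (pvBinDigits i.natAbs).filter (· ≠ '0') := by
  have hne : i.natAbs ≠ 0 := by
    intro h0
    have : i = 0 := Int.natAbs_eq_zero.mp h0
    subst this
    simp [PySem.Int.mod] at h
  have hb : 'b' ∉ pvBinDigits i.natAbs := by
    intro hmem
    rcases pvBinDigits_mem i.natAbs 'b' hmem with h' | h' <;> simp at h'
  have htl : (pvBin i).toList =
      (if i < 0 then ['-'] else []) ++ '0' :: 'b' :: pvBinDigits i.natAbs := by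
    unfold pvBin
    split <;> simp [hne]
  simp only [PySem.Str.toList_replace]
  rw [htl]
  have hpre : (if i < 0 then ['-'] else ([] : List Char)) = [] ∨
      (if i < 0 then ['-'] else ([] : List Char)) = ['-'] := by
    split <;> simp
  have h0b : ("0b".toList : List Char) = ['0','b'] := by decide
  have h0 : ("0".toList : List Char) = ['0'] := by decide
  have hnil : ("".toList : List Char) = [] := by decide
  rw [h0b, h0, hnil, replace_0b _ _ hpre hb, replace_filter0]
  split <;> simp

-- all chars of the filtered digit list are '1'
theorem filtered_all_one (n : Nat) :
    ∀ c ∈ (pvBinDigits n).filter (· ≠ '0'), c = '1' := by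
  intro c hc
  rw [List.mem_filter] at hc
  rcases pvBinDigits_mem n c hc.1 with h | h
  · exact absurd h (by simpa using hc.2)
  · exact h

-- for odd i the filtered digit list is nonempty
theorem filtered_ne_nil (i : Int) (h : PySem.Int.mod i 2 = 1) :
    (pvBinDigits i.natAbs).filter (· ≠ '0') ≠ [] := by
  intro hnil
  have hcnt : (pvBinDigits i.natAbs).count '1' = 0 := by
    have h1 : '1' ∉ pvBinDigits i.natAbs := by
      intro hmem
      have : '1' ∈ (pvBinDigits i.natAbs).filter (· ≠ '0') := by
        rw [List.mem_filter]; exact ⟨hmem, by decide⟩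
      rw [hnil] at this
      simp at this
    simp [List.count_eq_zero_of_not_mem h1]
  rw [pvBinDigits_count] at hcnt
  have hemod : i % 2 = 1 := by
    have h2 := PySem.Int.mod_eq_emod_of_pos (a := i) (b := 2) (by norm_num)
    omega
  have hpos : 0 < i.natAbs := by omega
  have habs : i.natAbs % 2 = 1 := by omega
  rw [PySem.Int.bitCount_natCast hpos] at hcnt
  omega

-- count of '1' in the filtered list equals bitCount
theorem filtered_count (n : Nat) :
    ((pvBinDigits n).filter (· ≠ '0')).count '1' = PySem.Int.bitCount (n : Int) := by
  rw [← pvBinDigits_count]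
  exact List.count_filter (by decide)

-- the signed popcount contributed by one element
def pvSigned (i : Int) : Int :=
  if PySem.Int.mod i 2 == 1 then
    (if 0 ≤ i then (PySem.Int.bitCount (if i < 0 then -i else i) : Int)
     else -(PySem.Int.bitCount (if i < 0 then -i else i) : Int))
  else 0

-- Φ of A's loop state
def pvPhi (st : String × String) : Int :=
  (PySem.Str.count st.2 "1" : Int) - (PySem.Str.count st.1 "1" : Int)

-- A's loop body
def pvStepA (st : String × String) (s : String) : String × String :=
  match PySem.Str.pyGet? s 0 with
  | some c => if c == '-' then (st.1 ++ PySem.Str.slice s (some 1) none, st.2)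
              else (st.1, st.2 ++ s)
  | none => (st.1, st.2 ++ s)

theorem count_str (s : String) : PySem.Str.count s "1" = s.toList.count '1' := by
  have h1 : ("1".toList : List Char) = ['1'] := by decide
  rw [PySem.Str.count_eq, h1, count_one]

-- one A-step on the processed string of an odd i shifts Φ by the signed popcount
theorem stepA_phi (st : String × String) (i : Int) (h : PySem.Int.mod i 2 = 1) :
    pvPhi (pvStepA st (PySem.Str.replace (PySem.Str.replace (pvBin i) "0b" "") "0" "")) =
      pvPhi st + pvSigned i := by
  set s := PySem.Str.replace (PySem.Str.replace (pvBin i) "0b" "") "0" "" with hs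
  have htl := processed_toList i h
  rw [← hs] at htl
  have hfc := filtered_count i.natAbs
  have hemod : i % 2 = 1 := by
    have h2 := PySem.Int.mod_eq_emod_of_pos (a := i) (b := 2) (by norm_num)
    omega
  by_cases hneg : i < 0
  · have htl' : s.toList = '-' :: (pvBinDigits i.natAbs).filter (· ≠ '0') := by
      rw [htl]; simp [hneg]
    have hget : PySem.Str.pyGet? s 0 = some '-' := by
      rw [PySem.Str.pyGet?_eq, PySem.Chars.pyGet?_eq_listPyGet?, htl']
      simp [PySem.List.pyGet?, PySem.List.pyIdx?]
    have hsl : (PySem.Str.slice s (some 1) none).toList =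
        (pvBinDigits i.natAbs).filter (· ≠ '0') := by
      rw [PySem.Str.toList_slice, PySem.Chars.slice_eq_listSlice,
        PySem.List.slice_from_one, htl']
      simp
    unfold pvStepA pvPhi pvSigned
    rw [hget]
    simp only [beq_self_eq_true, if_true]
    have hbc : ((if i < 0 then -i else i)) = ((i.natAbs : Int)) := by
      simp only [hneg, if_true]; omega
    rw [count_str (st.1 ++ _), count_str st.1, count_str st.2]
    have happ : (st.1 ++ PySem.Str.slice s (some 1) none).toList =
        st.1.toList ++ (pvBinDigits i.natAbs).filter (· ≠ '0') := by
      rw [← hsl]; simp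
    rw [happ, List.count_append, hfc, hbc]
    have hni : ¬ 0 ≤ i := by omega
    simp [hni, hemod]
    ring
  · have htl' : s.toList = (pvBinDigits i.natAbs).filter (· ≠ '0') := by
      rw [htl]; simp [hneg]
    obtain ⟨c, rest, hcr⟩ : ∃ c rest, (pvBinDigits i.natAbs).filter (· ≠ '0') = c :: rest := by
      rcases hl : (pvBinDigits i.natAbs).filter (· ≠ '0') with _ | ⟨c, rest⟩
      · exact absurd hl (filtered_ne_nil i h)
      · exact ⟨c, rest, rfl⟩
    have hc1 : c = '1' := filtered_all_one i.natAbs c (by rw [hcr]; simp)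
    have hget : PySem.Str.pyGet? s 0 = some '1' := by
      rw [PySem.Str.pyGet?_eq, PySem.Chars.pyGet?_eq_listPyGet?, htl', hcr, hc1]
      simp [PySem.List.pyGet?, PySem.List.pyIdx?]
    unfold pvStepA pvPhi pvSigned
    rw [hget]
    have hne : ('1' == '-') = false := by decide
    simp only [hne, Bool.false_eq_true, if_false]
    have hbc : ((if i < 0 then -i else i)) = ((i.natAbs : Int)) := by
      simp only [hneg, if_false]; omega
    rw [count_str (st.2 ++ s), count_str st.1, count_str st.2]
    have happ : (st.2 ++ s).toList = st.2.toList ++ (pvBinDigits i.natAbs).filter (· ≠ '0') := by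
      rw [← htl']; simp
    rw [happ, List.count_append, hfc, hbc]
    have h0 : 0 ≤ i := by omega
    simp [h0, hemod]
    ring

-- B's loop body, named
def pvStepB (total i : Int) : Int :=
  if PySem.Int.mod i 2 == 1 then
    total + (if 0 ≤ i then (PySem.Int.bitCount (if i < 0 then -i else i) : Int)
             else -(PySem.Int.bitCount (if i < 0 then -i else i) : Int))
  else total

theorem pvStepB_eq (t i : Int) : pvStepB t i = t + pvSigned i := by
  unfold pvStepB pvSigned
  by_cases hb : (PySem.Int.mod i 2 == 1) = true
  · rw [if_pos hb, if_pos hb]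
  · rw [if_neg hb, if_neg hb]; ring

theorem foldB_shift (l : List Int) : ∀ t : Int, l.foldl pvStepB t = t + l.foldl pvStepB 0 := by
  induction l with
  | nil => intro t; simp
  | cons i l ih =>
    intro t
    simp only [List.foldl_cons]
    rw [ih (pvStepB t i), ih (pvStepB 0 i), pvStepB_eq t i, pvStepB_eq 0 i]
    ring

-- the two loops move in lockstep
theorem main_loop (l : List Int) : ∀ st : String × String,
    pvPhi (((l.filter (fun i => PySem.Int.mod i 2 == 1)).map
        (fun i => PySem.Str.replace (PySem.Str.replace (pvBin i) "0b" "") "0" "")).foldl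
        pvStepA st) =
      pvPhi st + l.foldl pvStepB 0 := by
  induction l with
  | nil => intro st; simp
  | cons i l ih =>
    intro st
    by_cases h : PySem.Int.mod i 2 = 1
    · have hb : (PySem.Int.mod i 2 == 1) = true := by rw [h]; decide
      simp only [List.filter_cons, hb, if_true, List.map_cons, List.foldl_cons]
      rw [ih (pvStepA st _), stepA_phi st i h, foldB_shift l (pvStepB 0 i), pvStepB_eq 0 i]
      ring
    · have hb : (PySem.Int.mod i 2 == 1) = false := by
        simp only [beq_eq_false_iff_ne, ne_eq]; exact h
      have hsg : pvSigned i = 0 := by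
        unfold pvSigned; rw [if_neg (by rw [hb]; simp)]
      simp only [List.filter_cons, hb, Bool.false_eq_true, if_false, List.foldl_cons]
      rw [ih st, foldB_shift l (pvStepB 0 i), pvStepB_eq 0 i, hsg]
      ring

-- ===== VERDICT (by name: the statement is the Claim_ definition above) =====
theorem num_odd_spec : Claim_equal_num_odd := by
  intro numbers _
  show num_odd numbers = num_odd_alt numbers
  have h0 : num_odd numbers =
      pvPhi (((numbers.filter (fun i => PySem.Int.mod i 2 == 1)).map
        (fun i => PySem.Str.replace (PySem.Str.replace (pvBin i) "0b" "") "0" "")).foldl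
        pvStepA ("", "")) := rfl
  have h1 : num_odd_alt numbers = numbers.foldl pvStepB 0 := rfl
  have hinit : pvPhi ("", "") = 0 := by decide
  rw [h0, h1, main_loop numbers ("", ""), hinit, zero_add]
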